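-- pv_equiv track=rewrite | github.com/undefineduser76/PythonAlgorithmStudy | Week1/Q1/네오.py | solution
-- ===== SOURCE A (Python) =====
-- def solution(n, lost, reserve):
--     # 중복을 쉽게 제거하기 위해 각각의 집합을 구합니다.
--     set_lost = set(lost)
--     set_reserve = set(reserve)
--
--     # lost 는 중복이 제거된 리스트이며, 오름차순으로 정렬됐습니다.
--     # 이는 번호 순서대로 체육복을 빌리기 위함입니다.
--     lost = sorted(set_lost - set_reserve)
--
--     # reserve 는 중복이 제거된 집합입니다.
--     # 여벌이 있어서 타 학생에게 체육복을 빌려줄 수 있는 학생의 집합입니다.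
--     reserve = set_reserve - set_lost
--
--     # 정답은 '학생 수 - 체육복이 없는 학생 수' 에서 시작합니다.
--     # 이 수는 이미 자신의 체육복이 한 벌 이상 있는 학생 수입니다.
--     answer = n - len(lost)
--
--     # i번 학생에게 체육복을 빌려줍니다.
--     for i in lost:
--         # candidates 는 i-1, i+1 중 체육복을 빌려줄 수 있는 학생의 후보군입니다.
--         candidates = [i + j for j in [-1, 1] if i + j in reserve]
--
--         if len(candidates) > 0:
--             # candidates 중 가장 앞의 학생에게서 체육복을 빌립니다.
--             # 체육복을 빌리는 데 성공했으므로 정답에 1을 더해줍니다.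
--             reserve.remove(candidates[0])
--             answer += 1
--
--     return answer
-- ===== SOURCE B (Python) =====
-- def solution(n, lost, reserve):
--     L = sorted(set(lost) - set(reserve))
--     R = sorted(set(reserve) - set(lost))
--     answer = n - len(L)
--     j = 0
--     for i in L:
--         while j < len(R) and R[j] < i - 1:
--             j += 1
--         if j < len(R) and (R[j] == i - 1 or R[j] == i + 1):
--             j += 1
--             answer += 1
--     return answer
-- ===== Notes on version B (the rewrite author's own statement) =====
-- stated objective: alternative
-- what changed: Replaces A's per-lost-student membership probing and removal in a mutable reserve set by a single two-pointer sweep over the two sorted deduplicated lists (no set mutation, no candidate-list construction).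
import Mathlib
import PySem

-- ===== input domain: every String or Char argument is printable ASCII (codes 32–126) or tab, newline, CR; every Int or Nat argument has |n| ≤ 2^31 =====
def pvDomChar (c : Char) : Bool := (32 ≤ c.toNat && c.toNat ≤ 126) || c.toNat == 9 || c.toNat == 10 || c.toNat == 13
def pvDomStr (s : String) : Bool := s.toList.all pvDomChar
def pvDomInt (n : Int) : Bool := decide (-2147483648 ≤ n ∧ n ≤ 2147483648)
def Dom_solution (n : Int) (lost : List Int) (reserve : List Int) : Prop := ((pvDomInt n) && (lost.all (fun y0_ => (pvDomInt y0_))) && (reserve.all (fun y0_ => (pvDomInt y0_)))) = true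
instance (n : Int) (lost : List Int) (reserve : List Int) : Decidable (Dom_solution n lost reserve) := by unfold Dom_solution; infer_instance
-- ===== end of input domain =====

-- B replaces A's mutable reserve set and per-student candidate lists by one two-pointer
-- merge over the two sorted deduplicated lists (objective: alternative, same asymptotic cost).

-- ===== PORT A =====
-- A's loop body: candidates = [i+j for j in [-1,1] if i+j in reserve]; if any, remove first, answer += 1.
-- 'reserve.remove(candidates[0])' is ported as Set.discard: the removed element is in the set by
-- construction (it passed the membership filter), so Python's remove cannot raise here and discard is exact.
def stepA (st : PySem.Set Int × Int) (i : Int) : PySem.Set Int × Int :=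
  let candidates := (([-1, 1] : List Int).filter (fun j => PySem.Set.contains st.1 (i + j))).map (fun j => i + j)
  match candidates with
  | [] => st
  | c :: _ => (PySem.Set.discard st.1 c, st.2 + 1)

def solution (n : Int) (lost : List Int) (reserve : List Int) : Int :=
  let setLost : PySem.Set Int := PySem.Set.ofList lost
  let setReserve : PySem.Set Int := PySem.Set.ofList reserve
  let lostL : List Int := PySem.List.sorted (PySem.Set.diff setLost setReserve) (fun x => x) false
  let reserve0 : PySem.Set Int := PySem.Set.diff setReserve setLost
  let answer : Int := n - (lostL.length : Int)
  (lostL.foldl stepA (reserve0, answer)).2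

-- ===== PORT B =====
-- the inner 'while j < len(R) and R[j] < i - 1: j += 1', as advancing over the suffix
def skipB (i : Int) : List Int → List Int
  | [] => []
  | r :: rest => if r < i - 1 then skipB i rest else r :: rest

-- the 'for i in L' two-pointer pass, returning the number of matched lost students
def twoPtr : List Int → List Int → Int
  | [], _ => 0
  | i :: L, R =>
    match skipB i R with
    | [] => twoPtr L []
    | r :: rest => if r = i - 1 ∨ r = i + 1 then 1 + twoPtr L rest else twoPtr L (r :: rest)

def solution_alt (n : Int) (lost : List Int) (reserve : List Int) : Int :=
  let L : List Int := PySem.List.sorted (PySem.Set.diff (PySem.Set.ofList lost) (PySem.Set.ofList reserve)) (fun x => x) false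
  let R : List Int := PySem.List.sorted (PySem.Set.diff (PySem.Set.ofList reserve) (PySem.Set.ofList lost)) (fun x => x) false
  n - (L.length : Int) + twoPtr L R

-- ===== PRECONDITION & SPEC =====
def Spec_solution (n : Int) (lost : List Int) (reserve : List Int) (out : Int) : Prop := out = solution_alt n lost reserve
instance (n : Int) (lost : List Int) (reserve : List Int) (out : Int) : Decidable (Spec_solution n lost reserve out) := by unfold Spec_solution; infer_instance

-- ===== CLAIM (what is proved, stated in full; the proofs are below) =====
def Claim_equal_solution : Prop := ∀ (n : Int) (lost : List Int) (reserve : List Int), Dom_solution n lost reserve → Spec_solution n lost reserve (solution n lost reserve)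

-- ===== LEMMAS AND PROOFS =====

-- skip only drops a prefix of elements below i-1
lemma skipB_decomp (i : Int) (R : List Int) :
    ∃ D, R = D ++ skipB i R ∧ ∀ d ∈ D, d < i - 1 := by
  induction R with
  | nil => exact ⟨[], rfl, by simp⟩
  | cons r rest ih =>
    by_cases h : r < i - 1
    · obtain ⟨D, hD, hlt⟩ := ih
      refine ⟨r :: D, ?_, ?_⟩
      · rw [show skipB i (r :: rest) = skipB i rest from by simp [skipB, h]]
        simpa using hD
      · intro d hd
        rcases List.mem_cons.mp hd with hd | hd
        · omega
        · exact hlt d hd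
    · exact ⟨[], by simp [skipB, h], by simp⟩

lemma skipB_pairwise (i : Int) {R : List Int} (h : R.Pairwise (· < ·)) :
    (skipB i R).Pairwise (· < ·) := by
  induction R with
  | nil => simp [skipB]
  | cons r rest ih =>
    by_cases hc : r < i - 1
    · rw [show skipB i (r :: rest) = skipB i rest from by simp [skipB, hc]]
      exact ih (List.pairwise_cons.mp h).2
    · simpa [skipB, hc] using h

lemma skipB_head_ge (i r : Int) (rest R : List Int) (h : skipB i R = r :: rest) :
    i - 1 ≤ r := by
  induction R with
  | nil => simp [skipB] at h
  | cons x xs ih =>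
    by_cases hc : x < i - 1
    · exact ih (by simpa [skipB, hc] using h)
    · simp [skipB, hc] at h; omega

-- The main invariant: folding A's step over sorted lost-list L starting from a set s whose
-- elements are R (still-usable reserves, sorted, disjoint from L) plus "dead" elements too
-- small to ever be a candidate again, adds exactly twoPtr L R to the running answer.
lemma fold_stepA_eq (L : List Int) :
    ∀ (R : List Int) (s : PySem.Set Int) (a : Int),
    L.Pairwise (· < ·) → R.Pairwise (· < ·) →
    (∀ x, x ∈ s → x ∈ R ∨ ∀ i ∈ L, x < i - 1) →
    (∀ x ∈ R, x ∈ s) →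
    (∀ r ∈ R, ∀ i ∈ L, r ≠ i) →
    (L.foldl stepA (s, a)).2 = a + twoPtr L R := by
  induction L with
  | nil => intro R s a _ _ _ _ _; simp [twoPtr]
  | cons i L ih =>
    intro R s a hL hR hs hs2 hdisj
    obtain ⟨D, hDdec, hDlt⟩ := skipB_decomp i R
    have hiL : ∀ i' ∈ L, i < i' := (List.pairwise_cons.mp hL).1
    have hLp : L.Pairwise (· < ·) := (List.pairwise_cons.mp hL).2
    have hRp' : (skipB i R).Pairwise (· < ·) := skipB_pairwise i hR
    have hmemskip : ∀ x, x ∈ skipB i R → x ∈ R := by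
      intro x hx; rw [hDdec]; exact List.mem_append_right D hx
    have hnotdead : ∀ x, (x = i - 1 ∨ x = i + 1) → x ∈ s → x ∈ skipB i R := by
      intro x hx hxs
      rcases hs x hxs with hxR | hxd
      · rw [hDdec] at hxR
        rcases List.mem_append.mp hxR with h | h
        · have := hDlt x h; omega
        · exact h
      · have := hxd i (by simp); omega
    cases hskip : skipB i R with
    | nil =>
      have hno1 : ¬ (i + -1) ∈ s := by
        intro hxs
        have := hnotdead (i + -1) (Or.inl (by ring)) hxs
        rw [hskip] at this; simp at this
      have hno2 : ¬ (i + 1) ∈ s := by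
        intro hxs
        have := hnotdead (i + 1) (Or.inr rfl) hxs
        rw [hskip] at this; simp at this
      have hstep : stepA (s, a) i = (s, a) := by
        simp [stepA, hno1, hno2]
      have htw : twoPtr (i :: L) R = twoPtr L [] := by
        simp only [twoPtr, hskip]
      rw [List.foldl_cons, hstep, htw]
      refine ih [] s a hLp (by simp) ?_ (by simp) (by simp)
      intro x hxs
      right; intro i' hi'
      rcases hs x hxs with hxR | hxd
      · rw [hDdec, hskip] at hxR; simp at hxR
        have := hDlt x hxR; have := hiL i' hi'; omega
      · exact hxd i' (by simp [hi'])
    | cons r rest =>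
      have hrline : i - 1 ≤ r := skipB_head_ge i r rest R hskip
      have hrR : r ∈ R := hmemskip r (by simp [hskip])
      have hrne : r ≠ i := hdisj r hrR i (by simp)
      have hrest_gt : ∀ x ∈ rest, r < x := by
        rw [hskip] at hRp'; exact (List.pairwise_cons.mp hRp').1
      have hrs : r ∈ s := hs2 r hrR
      have hmem_iff : ∀ x, (x = i - 1 ∨ x = i + 1) → (x ∈ s ↔ x ∈ r :: rest) := by
        intro x hx
        constructor
        · intro hxs; rw [← hskip]; exact hnotdead x hx hxs
        · intro hxr; exact hs2 x (hmemskip x (by rw [hskip]; exact hxr))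
      have hsub : rest.Sublist (skipB i R) := by rw [hskip]; exact List.sublist_cons_self r rest
      -- the IH side conditions after removing the head r of the remaining reserves
      have hIHside : ∀ x, x ∈ PySem.Set.discard s r → x ∈ rest ∨ ∀ i' ∈ L, x < i' - 1 := by
        intro x hx
        obtain ⟨hxs, hxne⟩ := (PySem.Set.mem_discard _ _ _).mp hx
        rcases hs x hxs with hxR | hxd
        · rw [hDdec, hskip] at hxR
          rcases List.mem_append.mp hxR with h | h
          · right; intro i' hi'; have := hDlt x h; have := hiL i' hi'; omega
          · rcases List.mem_cons.mp h with h | h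
            · exact absurd h hxne
            · exact Or.inl h
        · right; intro i' hi'; exact hxd i' (by simp [hi'])
      have hIHside2 : ∀ x ∈ rest, x ∈ PySem.Set.discard s r := by
        intro x hx
        refine (PySem.Set.mem_discard _ _ _).mpr ⟨hs2 x (hmemskip x (by rw [hskip]; exact List.mem_cons_of_mem r hx)), ?_⟩
        have := hrest_gt x hx; omega
      have hIHside3 : ∀ x ∈ rest, ∀ i' ∈ L, x ≠ i' := by
        intro x hx i' hi'
        exact hdisj x (hmemskip x (by rw [hskip]; exact List.mem_cons_of_mem r hx)) i' (by simp [hi'])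
      by_cases hr1 : r = i - 1
      · -- lend from the left neighbour
        have hin1 : (i + -1) ∈ s := by
          rw [show i + -1 = i - 1 by ring, ← hr1]; exact hrs
        have hstep : stepA (s, a) i = (PySem.Set.discard s (i + -1), a + 1) := by
          by_cases h2 : (i + 1) ∈ s <;> simp [stepA, hin1, h2]
        have htw : twoPtr (i :: L) R = 1 + twoPtr L rest := by
          simp only [twoPtr, hskip]
          rw [if_pos (Or.inl hr1)]
        rw [List.foldl_cons, hstep, htw]
        have hdr : PySem.Set.discard s (i + -1) = PySem.Set.discard s r := by
          rw [show (i + -1 : Int) = i - 1 by ring, hr1]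
        rw [hdr, ih rest _ (a + 1) hLp (hRp'.sublist hsub) hIHside hIHside2 hIHside3]
        ring
      · have hrgt : i + 1 ≤ r := by omega
        by_cases hr2 : r = i + 1
        · -- left neighbour unavailable, lend from the right neighbour
          have hno1 : ¬ (i + -1) ∈ s := by
            intro hxs
            have hmem : (i - 1) ∈ s := by rw [show i - 1 = i + -1 by ring]; exact hxs
            rcases List.mem_cons.mp ((hmem_iff (i - 1) (Or.inl rfl)).mp hmem) with h' | h'
            · omega
            · have := hrest_gt _ h'; omega
          have hin2 : (i + 1) ∈ s := by rw [← hr2]; exact hrs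
          have hstep : stepA (s, a) i = (PySem.Set.discard s (i + 1), a + 1) := by
            simp [stepA, hno1, hin2]
          have htw : twoPtr (i :: L) R = 1 + twoPtr L rest := by
            simp only [twoPtr, hskip]
            rw [if_pos (Or.inr hr2)]
          rw [List.foldl_cons, hstep, htw]
          have hdr : PySem.Set.discard s (i + 1) = PySem.Set.discard s r := by rw [hr2]
          rw [hdr, ih rest _ (a + 1) hLp (hRp'.sublist hsub) hIHside hIHside2 hIHside3]
          ring
        · -- no neighbour available: r > i+1
          have hrbig : i + 1 < r := by omega
          have hno : ∀ x, (x = i - 1 ∨ x = i + 1) → ¬ x ∈ s := by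
            intro x hx hxs
            rcases List.mem_cons.mp ((hmem_iff x hx).mp hxs) with h' | h'
            · rcases hx with h | h <;> omega
            · have := hrest_gt _ h'; rcases hx with h | h <;> omega
          have hno1 : ¬ (i + -1) ∈ s := by
            intro hxs; exact hno (i - 1) (Or.inl rfl) (by rw [show i - 1 = i + -1 by ring]; exact hxs)
          have hno2 : ¬ (i + 1) ∈ s := hno (i + 1) (Or.inr rfl)
          have hstep : stepA (s, a) i = (s, a) := by simp [stepA, hno1, hno2]
          have htw : twoPtr (i :: L) R = twoPtr L (r :: rest) := by
            simp only [twoPtr, hskip]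
            rw [if_neg (by rintro (h | h) <;> omega)]
          rw [List.foldl_cons, hstep, htw]
          refine ih (r :: rest) s a hLp (by rw [← hskip]; exact hRp') ?_ ?_ ?_
          · intro x hxs
            rcases hs x hxs with hxR | hxd
            · rw [hDdec, hskip] at hxR
              rcases List.mem_append.mp hxR with h | h
              · right; intro i' hi'; have := hDlt x h; have := hiL i' hi'; omega
              · exact Or.inl h
            · right; intro i' hi'; exact hxd i' (by simp [hi'])
          · intro x hx; exact hs2 x (hmemskip x (by rw [hskip]; exact hx))
          · intro x hx i' hi'
            exact hdisj x (hmemskip x (by rw [hskip]; exact hx)) i' (by simp [hi'])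

-- sortedness of sorted(diff of sets): strictly increasing
lemma sorted_diff_pairwise (xs ys : List Int) :
    (PySem.List.sorted (PySem.Set.diff (PySem.Set.ofList xs) (PySem.Set.ofList ys)) (fun x => x) false).Pairwise (· < ·) := by
  have hle := PySem.List.sorted_pairwise (PySem.Set.diff (PySem.Set.ofList xs) (PySem.Set.ofList ys)) (fun x => x)
  have hnd : (PySem.List.sorted (PySem.Set.diff (PySem.Set.ofList xs) (PySem.Set.ofList ys)) (fun x => x) false).Nodup :=
    (PySem.List.sorted_perm _ _ _).nodup_iff.mpr
      (PySem.Set.nodup_diff _ _ (PySem.Set.nodup_ofList xs))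
  exact (hle.and hnd).imp (fun h => lt_of_le_of_ne h.1 h.2)

-- ===== VERDICT (by name: the statement is the Claim_ definition above) =====
theorem solution_spec : Claim_equal_solution := by
  intro n lost reserve _
  unfold Spec_solution solution solution_alt
  have key := fold_stepA_eq
    (PySem.List.sorted (PySem.Set.diff (PySem.Set.ofList lost) (PySem.Set.ofList reserve)) (fun x => x) false)
    (PySem.List.sorted (PySem.Set.diff (PySem.Set.ofList reserve) (PySem.Set.ofList lost)) (fun x => x) false)
    (PySem.Set.diff (PySem.Set.ofList reserve) (PySem.Set.ofList lost))
    (n - ((PySem.List.sorted (PySem.Set.diff (PySem.Set.ofList lost) (PySem.Set.ofList reserve)) (fun x => x) false).length : Int))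
    (sorted_diff_pairwise lost reserve)
    (sorted_diff_pairwise reserve lost)
    (by intro x hx; left; exact (PySem.List.mem_sorted _ _ _ _).mpr hx)
    (by intro x hx; exact (PySem.List.mem_sorted _ _ _ _).mp hx)
    (by
      intro r hr i hi
      have hrd := (PySem.List.mem_sorted _ _ _ _).mp hr
      have hid := (PySem.List.mem_sorted _ _ _ _).mp hi
      have h1 := (PySem.Set.mem_diff _ _ _).mp hrd
      have h2 := (PySem.Set.mem_diff _ _ _).mp hid
      intro h; rw [h] at h1; exact h1.2 h2.1)
  simpa using key
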